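-- pv_equiv track=rewrite | github.com/zihao-guo/IA101-TD | ia01/evaluation.py | partition_val_croisee
-- ===== SOURCE A (Python) =====
-- def partition_val_croisee(X, y, K=5):
--     """Partitionne un ensemble X, y en K sous-ensemble.
--
--     Paramètres
--     ----------
--     X : list[list]
--         Liste de vecteurs à partitionner
--     y : list
--         Liste des prédictions associées à X
--     K : int, default = 5
--         Nombre de partitions
--
--     Sorties
--     -------
--     X_K, y_K :
--         Liste comprenant les K sous-ensembles de X et y
--     """
--     n = len(X)
--     X_K, y_K = [], []
--     for k in range(K):
--         X_K.append([])
--         y_K.append([])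
--     for i in range(n):
--         X_K[i % K].append(X[i])
--         y_K[i % K].append(y[i])
--     return X_K, y_K
-- ===== SOURCE B (Python) =====
-- def partition_val_croisee(X, y, K=5):
--     """Partitionne X, y en K sous-ensembles: chaque pli est pris directement
--     par un pas de K (X[k::K]; indices k, k+K, ... pour y)."""
--     n = len(X)
--     return ([X[k::K] for k in range(K)],
--             [[y[i] for i in range(k, n, K)] for k in range(K)])
-- ===== Notes on version B (the rewrite author's own statement) =====
-- stated objective: simpler
-- what changed: B builds each fold directly as a stride of step K (X[k::K], and indices k, k+K, ... for y) instead of A's one-pass distribution of every element into K pre-allocated buckets via i % K.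
import Mathlib
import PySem

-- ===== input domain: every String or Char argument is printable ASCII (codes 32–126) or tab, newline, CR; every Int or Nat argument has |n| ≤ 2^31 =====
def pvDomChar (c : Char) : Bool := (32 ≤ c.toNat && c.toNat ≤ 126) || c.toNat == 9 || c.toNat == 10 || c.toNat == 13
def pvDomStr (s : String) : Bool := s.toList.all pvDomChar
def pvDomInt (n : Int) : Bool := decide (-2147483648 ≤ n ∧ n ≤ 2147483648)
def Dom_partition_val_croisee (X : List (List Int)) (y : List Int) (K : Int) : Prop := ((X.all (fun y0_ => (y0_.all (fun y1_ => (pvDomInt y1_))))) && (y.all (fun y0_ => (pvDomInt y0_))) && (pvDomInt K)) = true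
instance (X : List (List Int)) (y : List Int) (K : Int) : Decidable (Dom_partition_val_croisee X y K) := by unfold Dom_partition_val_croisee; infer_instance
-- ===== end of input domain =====

-- B builds each fold directly by a stride of K (X[k::K]; indices k, k+K, … for y)
-- instead of distributing elements one by one into K buckets; return values only.

-- ===== PORT A =====
def partition_val_croisee (X : List (List Int)) (y : List Int) (K : Int) : List (List (List Int)) × List (List Int) :=
  let n : Int := PySem.List.len X
  -- for k in range(K): X_K.append([]); y_K.append([])
  let init : List (List (List Int)) × List (List Int) :=
    (PySem.List.pyRange 0 K 1).foldl (fun acc _ => (acc.1 ++ [[]], acc.2 ++ [[]])) ([], [])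
  -- for i in range(n): X_K[i % K].append(X[i]); y_K[i % K].append(y[i])
  -- 'X_K[i % K].append(v)' is ported as List.modify at (i % K).toNat: exact, since under
  -- Pre_ we have 0 < K, hence 0 ≤ i % K < K = number of buckets.
  (PySem.List.pyRange 0 n 1).foldl
    (fun acc i =>
      (acc.1.modify (PySem.Int.mod i K).toNat (· ++ [PySem.List.pyGetD X i []]),
       acc.2.modify (PySem.Int.mod i K).toNat (· ++ [PySem.List.pyGetD y i 0]))) init

-- ===== PORT B =====
-- X[k::K]: strided slice; hand-ported (PySem.List.slice gives xs[k:], pvStride takes every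
-- K-th element of it): exact for 0 ≤ k and K > 0, which holds for every k in range(K)
-- whenever that range is non-empty.
def pvStride {α : Type} (K : Nat) : List α → List α
  | [] => []
  | x :: rest => x :: pvStride K (rest.drop (K - 1))
termination_by xs => xs.length
decreasing_by simp

def partition_val_croisee_alt (X : List (List Int)) (y : List Int) (K : Int) : List (List (List Int)) × List (List Int) :=
  let n : Int := PySem.List.len X
  ((PySem.List.pyRange 0 K 1).map (fun k => pvStride K.toNat (PySem.List.slice X (some k) none)),
   (PySem.List.pyRange 0 K 1).map (fun k =>
     (PySem.List.pyRange k n K).map (fun i => PySem.List.pyGetD y i 0)))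

-- ===== PRECONDITION & SPEC =====
-- Pre_ excludes exactly the inputs on which A raises: len(y) < len(X) (IndexError on y[i])
-- and a non-empty X with K ≤ 0 (ZeroDivisionError for K = 0, IndexError for K < 0).
def Pre_partition_val_croisee (X : List (List Int)) (y : List Int) (K : Int) : Prop :=
  X.length ≤ y.length ∧ (X = [] ∨ 0 < K)
instance (X : List (List Int)) (y : List Int) (K : Int) : Decidable (Pre_partition_val_croisee X y K) := by unfold Pre_partition_val_croisee; infer_instance

def pvWitness_partition_val_croisee : List (List Int) × List Int × Int := ([[1], [2], [3]], [1, 2, 3], 2)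

def Spec_partition_val_croisee (X : List (List Int)) (y : List Int) (K : Int) (out : List (List (List Int)) × List (List Int)) : Prop := out = partition_val_croisee_alt X y K
instance (X : List (List Int)) (y : List Int) (K : Int) (out : List (List (List Int)) × List (List Int)) : Decidable (Spec_partition_val_croisee X y K out) := by unfold Spec_partition_val_croisee; infer_instance

-- ===== CLAIM (what is proved, stated in full; the proofs are below) =====
def Claim_equal_partition_val_croisee : Prop := ∀ (X : List (List Int)) (y : List Int) (K : Int), Dom_partition_val_croisee X y K → Pre_partition_val_croisee X y K → Spec_partition_val_croisee X y K (partition_val_croisee X y K)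

-- ===== LEMMAS AND PROOFS =====

-- a foldl acting independently on the components of a pair splits into two foldls
lemma pv_foldl_pair {α β ι : Type} (f : α → ι → α) (g : β → ι → β) :
    ∀ (l : List ι) (a : α) (b : β),
      l.foldl (fun p i => (f p.1 i, g p.2 i)) (a, b) = (l.foldl f a, l.foldl g b) := by
  intro l
  induction l with
  | nil => intro a b; rfl
  | cons i t ih => intro a b; simpa using ih (f a i) (g b i)

-- repeatedly appending a constant yields a replicate
lemma pv_foldl_snoc_const {α ι : Type} (c : α) :
    ∀ (l : List ι) (a : List α),
      l.foldl (fun acc _ => acc ++ [c]) a = a ++ List.replicate l.length c := by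
  intro l
  induction l with
  | nil => intro a; simp
  | cons i t ih =>
      intro a
      simp only [List.foldl_cons, List.length_cons, ih, List.append_assoc,
        List.singleton_append, List.replicate_succ]

-- (i+1) % k in terms of i % k, for a variable modulus
lemma pv_succ_mod (k i j : Nat) (hk : 0 < k) (hj : j < k) :
    ((i + 1) % k = j) ↔ (i % k = if j = 0 then k - 1 else j - 1) := by
  have key : (i + 1) % k = (i % k + 1) % k := by
    conv_lhs => rw [show i + 1 = i % k + 1 + k * (i / k) by
      rw [add_right_comm, Nat.mod_add_div]]
    exact Nat.add_mul_mod_self_left _ _ _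
  have hr : i % k < k := Nat.mod_lt _ hk
  rcases Nat.lt_or_ge (i % k + 1) k with h | h
  · rw [key, Nat.mod_eq_of_lt h]
    split_ifs with h0 <;> omega
  · have he : i % k + 1 = k := by omega
    rw [key, he, Nat.mod_self]
    split_ifs with h0 <;> omega

-- A's distribution loop, characterised: bucket j collects the values at indices ≡ j (mod k)
lemma pv_dealFold {α : Type} (k : Nat) (v : Nat → α) :
    ∀ n : Nat,
      (List.range n).foldl (fun a i => a.modify (i % k) (· ++ [v i])) (List.replicate k []) =
        (List.range k).map (fun j => ((List.range n).filter (fun i => i % k = j)).map v) := by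
  intro n
  induction n with
  | zero => simp
  | succ n ih =>
      rw [List.range_succ, List.foldl_append, ih]
      simp only [List.foldl_cons, List.foldl_nil]
      apply List.ext_getElem
      · simp
      · intro j hj hj'
        simp only [List.length_map, List.length_range] at hj'
        by_cases hcase : n % k = j
        · rw [List.getElem_modify]
          simp [hcase, List.filter_append]
        · rw [List.getElem_modify]
          simp [hcase, List.filter_append, List.getElem_map]

-- B's stride through xs.drop j, characterised the same way
lemma pv_strideFilter {α : Type} (k : Nat) (hk : 0 < k) (d : α) :
    ∀ (xs : List α) (j : Nat), j < k →
      pvStride k (xs.drop j) =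
        ((List.range xs.length).filter (fun i => i % k = j)).map (fun i => xs.getD i d) := by
  intro xs
  induction xs with
  | nil => intro j hj; simp [pvStride]
  | cons a t ih =>
      intro j hj
      have hmain :
          ((List.range (a :: t).length).filter (fun i => i % k = j)).map
              (fun i => (a :: t).getD i d) =
            (if j = 0 then [a] else []) ++
              ((List.range t.length).filter
                  (fun i => i % k = if j = 0 then k - 1 else j - 1)).map
                (fun i => t.getD i d) := by
        rw [List.length_cons, List.range_succ_eq_map]
        rw [List.filter_cons]
        rw [List.filter_map]
        simp only [Function.comp_def, Nat.succ_eq_add_one]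
        by_cases hz : j = 0
        · subst hz
          simp only [Nat.zero_mod, decide_true]
          rw [show (fun i => decide ((i + 1) % k = 0)) = (fun i => decide (i % k = k - 1)) from
            funext fun i => by simp [pv_succ_mod k i 0 hk hk]]
          simp [List.map_map, Function.comp_def]
        · simp only [Nat.zero_mod, hz, decide_eq_true_eq]
          rw [if_neg (by omega : ¬ (0 = j))]
          rw [show (fun i => decide ((i + 1) % k = j)) =
              (fun i => decide (i % k = j - 1)) from
            funext fun i => by simp [pv_succ_mod k i j hk hj, hz]]
          simp [List.map_map, Function.comp_def]
      rw [hmain]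
      by_cases hz : j = 0
      · subst hz
        simp only [List.drop_zero]
        cases t with
        | nil =>
            simp [pvStride]
        | cons b t' =>
            rw [show pvStride k (a :: b :: t') = a :: pvStride k ((b :: t').drop (k - 1)) from
              by rw [pvStride]]
            rw [ih (k - 1) (by omega)]
            simp
      · have hj1 : (a :: t).drop j = t.drop (j - 1) := by
          cases j with
          | zero => omega
          | succ m => simp
        rw [hj1, ih (j - 1) (by omega)]
        simp [hz]

-- getD agrees on a take, inside the take
lemma pv_getD_take {α : Type} (y : List α) (n i : Nat) (d : α) (h : i < n) :
    (y.take n).getD i d = y.getD i d := by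
  simp [List.getD, h]

-- range(a, b, 1) with b ≤ a for a positive step is empty
lemma pv_pyRange_pos_nil (a b s : Int) (hs : 0 < s) (h : b ≤ a) :
    PySem.List.pyRange a b s = [] := by
  rw [PySem.List.pyRange_of_pos a b hs, if_neg (by omega)]
  simp

-- B's y-comprehension '[y[i] for i in range(k, n, K)]' IS the stride through (y.take n).drop k
lemma pv_rangeStride (K : Nat) (hK : 0 < K) (y : List Int) :
    ∀ (m k n : Nat), n - k ≤ m → n ≤ y.length →
      (PySem.List.pyRange (k : Int) (n : Int) (K : Int)).map
          (fun i => PySem.List.pyGetD y i 0) =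
        pvStride K ((y.take n).drop k) := by
  intro m
  induction m with
  | zero =>
      intro k n hm hn
      have hkn : n ≤ k := by omega
      rw [pv_pyRange_pos_nil _ _ _ (by exact_mod_cast hK) (by exact_mod_cast hkn)]
      have : (y.take n).drop k = [] := by
        apply List.drop_eq_nil_of_le; simp; omega
      simp [this, pvStride]
  | succ m ih =>
      intro k n hm hn
      by_cases hkn : n ≤ k
      · rw [pv_pyRange_pos_nil _ _ _ (by exact_mod_cast hK) (by exact_mod_cast hkn)]
        have : (y.take n).drop k = [] := by
          apply List.drop_eq_nil_of_le; simp; omega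
        simp [this, pvStride]
      · replace hkn : k < n := by omega
        -- head element formula from the closed form of pyRange
        have hKpos : (0:Int) < (K:Int) := by exact_mod_cast hK
        set d : Int := (n : Int) - (k : Int) with hd
        have hd0 : 0 < d := by simp [hd]; exact_mod_cast hkn
        have hcount : ((d + K - 1) / K).toNat = ((d - 1) / K).toNat + 1 := by
          have h1 : d + K - 1 = (d - 1) + 1 * K := by ring
          have h2 : (d + K - 1) / K = (d - 1) / K + 1 := by
            rw [h1, Int.add_mul_ediv_right _ _ (by omega : (K:Int) ≠ 0)]
          rw [h2]
          have hnn : (0:Int) ≤ (d - 1) / K := Int.ediv_nonneg (by omega) (by omega)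
          omega
        have hcons : PySem.List.pyRange (k : Int) (n : Int) (K : Int) =
            (k : Int) :: PySem.List.pyRange ((k + K : Nat) : Int) (n : Int) (K : Int) := by
          rw [PySem.List.pyRange_of_pos _ _ hKpos, if_pos (by exact_mod_cast hkn), ← hd,
            hcount, List.range_succ_eq_map]
          rw [PySem.List.pyRange_of_pos _ _ hKpos]
          by_cases hk2 : (k + K : Nat) < n
          · rw [if_pos (by exact_mod_cast hk2)]
            have : ((n : Int) - ((k + K : Nat) : Int) + K - 1) = d - 1 := by
              push_cast; ring
            rw [this]
            simp [List.map_map, Function.comp_def]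
            intro a _
            ring
          · rw [if_neg (by exact_mod_cast hk2)]
            have hdK : d - 1 < K := by push_cast at hk2 ⊢; omega
            have : (d - 1) / K = 0 := Int.ediv_eq_zero_of_lt (by omega) hdK
            simp [this]
        rw [hcons]
        -- right side: drop k of take n is nonempty; peel its head
        have hlen : (y.take n).length = n := by simp; omega
        have hdropne : k < (y.take n).length := by omega
        obtain ⟨b, rest, hbr⟩ : ∃ b rest, (y.take n).drop k = b :: rest :=
          List.exists_cons_of_ne_nil (by
            intro hnil
            have := List.drop_eq_nil_iff.mp hnil
            omega)
        have hb : b = y.getD k 0 := by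
          have h0 : (List.take n y)[k]? = some b := by
            have h1 := congrArg (fun l => l[0]?) hbr
            simpa [List.getElem?_drop] using h1
          have h2 : y[k]? = some b := by simpa [hkn] using h0
          simp [List.getD, h2]
        have htail : rest.drop (K - 1) = (y.take n).drop (k + K) := by
          have hrest : List.drop (k + 1) (List.take n y) = rest := by
            have := congrArg List.tail hbr
            simpa [List.tail_drop] using this
          rw [← hrest, List.drop_drop]
          congr 1; omega
        rw [hbr, show pvStride K (b :: rest) = b :: pvStride K (rest.drop (K - 1)) from
            by rw [pvStride],
          htail, ← ih (k + K) n (by omega) hn]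
        simp [hb, PySem.List.pyGetD_natCast]
  
-- main equality for one list: distribute = stride, over the first n elements
lemma pv_main_list {α : Type} (k : Nat) (hk : 0 < k) (d : α) (xs : List α) :
    (List.range xs.length).foldl (fun a i => a.modify (i % k) (· ++ [xs.getD i d]))
        (List.replicate k []) =
      (List.range k).map (fun j => pvStride k (xs.drop j)) := by
  rw [pv_dealFold k (fun i => xs.getD i d) xs.length]
  apply List.map_congr_left
  intro j hj
  rw [pv_strideFilter k hk d xs j (List.mem_range.mp hj)]

-- the y-folds: distribute = comprehension over range(j, n, k), for n ≤ len y
lemma pv_main_y (k : Nat) (hk : 0 < k) (y : List Int) (n : Nat) (hn : n ≤ y.length) :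
    (List.range n).foldl (fun a i => a.modify (i % k) (· ++ [y.getD i 0]))
        (List.replicate k []) =
      (List.range k).map (fun (j : Nat) =>
        (PySem.List.pyRange ((j : Nat) : Int) (n : Int) (k : Int)).map
          (fun i => PySem.List.pyGetD y i 0)) := by
  rw [pv_dealFold k (fun i => y.getD i 0) n]
  apply List.map_congr_left
  intro j hj
  rw [pv_rangeStride k hk y n j n (by omega) hn]
  have hjk : j < k := List.mem_range.mp hj
  have hlen : (y.take n).length = n := by simp; omega
  rw [pv_strideFilter k hk 0 (y.take n) j hjk, hlen]
  apply List.map_congr_left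
  intro i hi
  have : i < n := List.mem_range.mp (List.mem_of_mem_filter hi)
  exact (pv_getD_take y n i 0 this).symm

theorem partition_val_croisee_spec : Claim_equal_partition_val_croisee := by
  intro X y K _ hpre
  obtain ⟨hlen, hK0⟩ := hpre
  unfold Spec_partition_val_croisee partition_val_croisee partition_val_croisee_alt
  by_cases hK : 0 < K
  · have hKc : K = ((K.toNat : Nat) : Int) := (Int.toNat_of_nonneg (by omega)).symm
    have hk'pos : 0 < K.toNat := by omega
    simp only [PySem.List.len_eq]
    rw [pv_foldl_pair (fun (a : List (List (List Int))) (_ : Int) => a ++ [[]])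
        (fun (b : List (List Int)) (_ : Int) => b ++ [[]]),
      pv_foldl_snoc_const, pv_foldl_snoc_const]
    have hlenK : (PySem.List.pyRange 0 K 1).length = K.toNat := by
      rw [PySem.List.pyRange_one]; simp
    rw [hlenK]
    simp only [List.nil_append]
    rw [show PySem.List.pyRange 0 (X.length : Int) 1 =
        (List.range X.length).map (fun (j : Nat) => (j : Int)) by
      rw [PySem.List.pyRange_one]
      simp only [sub_zero, Int.toNat_natCast, zero_add]]
    rw [List.foldl_map]
    have hmod : ∀ j : Nat, PySem.Int.mod (j : Int) K = ((j % K.toNat : Nat) : Int) := by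
      intro j
      conv_lhs => rw [hKc]
      exact PySem.Int.mod_natCast j K.toNat
    have hfun :
        (fun (acc : List (List (List Int)) × List (List Int)) (j : Nat) =>
          (acc.1.modify (PySem.Int.mod (j : Int) K).toNat (· ++ [PySem.List.pyGetD X (j : Int) []]),
           acc.2.modify (PySem.Int.mod (j : Int) K).toNat (· ++ [PySem.List.pyGetD y (j : Int) 0]))) =
        (fun (acc : List (List (List Int)) × List (List Int)) (j : Nat) =>
          (acc.1.modify (j % K.toNat) (· ++ [X.getD j []]),
           acc.2.modify (j % K.toNat) (· ++ [y.getD j 0]))) := by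
      funext acc j
      rw [hmod]
      simp only [Int.toNat_natCast, PySem.List.pyGetD_natCast]
    rw [hfun]
    rw [pv_foldl_pair (fun (a : List (List (List Int))) (j : Nat) =>
          a.modify (j % K.toNat) (· ++ [X.getD j []]))
        (fun (b : List (List Int)) (j : Nat) =>
          b.modify (j % K.toNat) (· ++ [y.getD j 0]))]
    rw [show PySem.List.pyRange 0 K 1 = (List.range K.toNat).map (fun (j : Nat) => (j : Int)) by
      rw [PySem.List.pyRange_one]
      simp only [sub_zero, zero_add]]
    rw [List.map_map, List.map_map]
    refine Prod.ext ?_ ?_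
    · rw [pv_main_list K.toNat hk'pos [] X]
      apply List.map_congr_left
      intro j _
      simp [PySem.List.slice_from_natCast]
    · rw [pv_main_y K.toNat hk'pos y X.length hlen]
      apply List.map_congr_left
      intro j _
      simp only [Function.comp_def]
      rw [← hKc]
  · have hX : X = [] := by
      rcases hK0 with h | h
      · exact h
      · omega
    subst hX
    rw [pv_pyRange_pos_nil 0 K 1 one_pos (by omega)]
    simp [PySem.List.len_eq, pv_pyRange_pos_nil 0 0 1 one_pos (by omega)]
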